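-- pv_equiv track=rewrite | github.com/kzsofia92/benchmark470handler | app.py | _mask_date_text
-- ===== SOURCE A (Python) =====
-- def _mask_date_text(raw: str) -> str:
--     """Return text formatted as YYYY-MM-DD from arbitrary input; allow partials."""
--     digits = "".join(ch for ch in (raw or "") if ch.isdigit())[:8]  # up to YYYYMMDD
--     y = digits[0:4]
--     m = digits[4:6]
--     d = digits[6:8]
--     if len(digits) <= 4:
--         return y
--     if len(digits) <= 6:
--         return f"{y}.{m}"
--     return f"{y}.{m}.{d}"
-- ===== SOURCE B (Python) =====
-- def _mask_date_text(raw: str) -> str: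
--     """Return text formatted as YYYY-MM-DD from arbitrary input; allow partials."""
--     out = []
--     count = 0
--     for ch in (raw or ""):
--         if count == 8:
--             break
--         if ch.isdigit():
--             if count == 4 or count == 6:
--                 out.append(".")
--             out.append(ch)
--             count += 1
--     return "".join(out)
-- ===== Notes on version B (the rewrite author's own statement) =====
-- stated objective: alternative
-- what changed: Replaces the filter-all-then-slice-and-branch pipeline with a single streaming pass that breaks after 8 digits and emits a separator dot on the fly whenever the digit count reaches 4 or 6.
import Mathlib
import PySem

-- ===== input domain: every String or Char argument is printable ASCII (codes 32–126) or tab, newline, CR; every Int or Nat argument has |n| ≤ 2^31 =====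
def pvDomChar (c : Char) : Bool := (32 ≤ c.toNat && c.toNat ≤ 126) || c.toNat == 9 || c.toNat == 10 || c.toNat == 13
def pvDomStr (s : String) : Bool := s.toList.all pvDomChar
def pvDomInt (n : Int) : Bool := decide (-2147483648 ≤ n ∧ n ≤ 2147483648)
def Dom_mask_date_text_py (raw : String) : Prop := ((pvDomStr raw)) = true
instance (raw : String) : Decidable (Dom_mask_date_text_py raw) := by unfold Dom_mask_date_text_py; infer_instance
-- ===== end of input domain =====

-- B replaces A's filter-then-slice-and-branch pipeline with a single streaming pass that
-- breaks after 8 digits and emits a dot on the fly at digit counts 4 and 6; objective: alternative.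

-- ===== PORT A =====
-- 'raw or ""' only substitutes "" for the empty string, which filters to the same digit list,
-- so the filter is applied to raw directly; per-char ch.isdigit() is PySem.Chars.isdigit.
def mask_date_text_py (raw : String) : String :=
  let digits := PySem.List.slice (raw.toList.filter PySem.Chars.isdigit) none (some 8)
  let y := PySem.List.slice digits (some 0) (some 4)
  let m := PySem.List.slice digits (some 4) (some 6)
  let d := PySem.List.slice digits (some 6) (some 8)
  if PySem.List.len digits ≤ 4 then String.ofList y
  else if PySem.List.len digits ≤ 6 then String.ofList (y ++ '.' :: m)
  else String.ofList (y ++ '.' :: m ++ '.' :: d)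

-- ===== PORT B =====
-- The Python for-loop with 'break' and the 'out'/'count' accumulators, as structural
-- recursion on the character list carrying the digit count.
def pvBLoop : List Char → Nat → List Char
  | [], _ => []
  | c :: cs, count =>
    if count == 8 then []
    else if PySem.Chars.isdigit c then
      (if count == 4 || count == 6 then ['.', c] else [c]) ++ pvBLoop cs (count + 1)
    else pvBLoop cs count

def mask_date_text_py_alt (raw : String) : String :=
  String.ofList (pvBLoop raw.toList 0)

-- ===== PRECONDITION & SPEC =====
def Spec_mask_date_text_py (raw : String) (out : String) : Prop := out = mask_date_text_py_alt raw
instance (raw : String) (out : String) : Decidable (Spec_mask_date_text_py raw out) := by unfold Spec_mask_date_text_py; infer_instance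

-- ===== CLAIM (what is proved, stated in full; the proofs are below) =====
def Claim_equal_mask_date_text_py : Prop := ∀ (raw : String), Dom_mask_date_text_py raw → Spec_mask_date_text_py raw (mask_date_text_py raw)

-- ===== LEMMAS AND PROOFS =====

-- What B's loop emits, as a function of the remaining digit characters and the count.
def pvEmit : List Char → Nat → List Char
  | [], _ => []
  | c :: cs, k => (if k == 4 || k == 6 then ['.', c] else [c]) ++ pvEmit cs (k + 1)

lemma pvBLoop_eq_emit (cs : List Char) : ∀ (k : Nat), k ≤ 8 →
    pvBLoop cs k = pvEmit ((cs.filter PySem.Chars.isdigit).take (8 - k)) k := by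
  induction cs with
  | nil => intro k _; simp [pvBLoop, pvEmit]
  | cons c cs ih =>
    intro k hk
    by_cases h8 : k = 8
    · subst h8; simp [pvBLoop, pvEmit]
    · have hk' : k + 1 ≤ 8 := by omega
      by_cases hd : PySem.Chars.isdigit c
      · have htk : 8 - k = (8 - (k + 1)) + 1 := by omega
        simp [pvBLoop, h8, hd, htk, pvEmit, ih (k + 1) hk']
      · simp [pvBLoop, h8, hd, ih k hk]

-- A's formatting and pvEmit agree on any list of length ≤ 8 (exhaustive over the length).
lemma pv_fmt_eq (t : List Char) (h : t.length ≤ 8) :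
    (if PySem.List.len t ≤ 4 then String.ofList (PySem.List.slice t (some 0) (some 4))
     else if PySem.List.len t ≤ 6 then
       String.ofList (PySem.List.slice t (some 0) (some 4) ++ '.' :: PySem.List.slice t (some 4) (some 6))
     else
       String.ofList (PySem.List.slice t (some 0) (some 4) ++ '.' :: PySem.List.slice t (some 4) (some 6)
                  ++ '.' :: PySem.List.slice t (some 6) (some 8)))
    = String.ofList (pvEmit t 0) := by
  match t with
  | [] => simp [PySem.List.len, PySem.List.slice, PySem.List.clampIdx, pvEmit]
  | [a] => simp [PySem.List.len, PySem.List.slice, PySem.List.clampIdx, pvEmit]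
  | [a,b] => simp [PySem.List.len, PySem.List.slice, PySem.List.clampIdx, pvEmit]
  | [a,b,c] => simp [PySem.List.len, PySem.List.slice, PySem.List.clampIdx, pvEmit]
  | [a,b,c,d] => simp [PySem.List.len, PySem.List.slice, PySem.List.clampIdx, pvEmit]
  | [a,b,c,d,e] => simp [PySem.List.len, PySem.List.slice, PySem.List.clampIdx, pvEmit]
  | [a,b,c,d,e,f] => simp [PySem.List.len, PySem.List.slice, PySem.List.clampIdx, pvEmit]
  | [a,b,c,d,e,f,g] => simp [PySem.List.len, PySem.List.slice, PySem.List.clampIdx, pvEmit]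
  | [a,b,c,d,e,f,g,h'] => simp [PySem.List.len, PySem.List.slice, PySem.List.clampIdx, pvEmit]
  | a::b::c::d::e::f::g::h'::i::rest => simp at h; omega

-- ===== VERDICT (by name: the statement is the Claim_ definition above) =====
theorem mask_date_text_py_spec : Claim_equal_mask_date_text_py := by
  intro raw _
  unfold Spec_mask_date_text_py mask_date_text_py mask_date_text_py_alt
  have h8 : PySem.List.slice (raw.toList.filter PySem.Chars.isdigit) none (some 8)
      = (raw.toList.filter PySem.Chars.isdigit).take 8 := by
    simpa using PySem.List.slice_to_natCast (raw.toList.filter PySem.Chars.isdigit) 8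
  rw [h8, pvBLoop_eq_emit raw.toList 0 (by omega)]
  exact pv_fmt_eq _ (List.length_take_le _ _)
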